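-- pv_equiv track=rewrite | github.com/jfine2358/py-linhomy | py/linhomy/rankmatrices.py | expand_c
-- ===== SOURCE A (Python) =====
-- def expand_c(ints):
--
--     '''Return tuple of ints.
--
--     Move C rightwards.  For example, CCCD contributes also to CCDC and
--     CDCC.
--     '''
--     if len(ints) <= 1:
--         return (ints,)
--
--     head = ints[0]
--     body = ints[1:]
--
--     return tuple(sorted(
--         # Create new tuple with possible decremented tail.
--         tuple((head - i,) + item)
--         # Iterate over the possible decrements.
--         for i in range(head + 1)
--         # For given decrement, recursively iterate over items.
--         for item in expand_c((body[0] + i,) + body[1:])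
--     ))
-- ===== SOURCE B (Python) =====
-- def expand_c(ints):
--     '''Return tuple of ints.
--
--     Move C rightwards.  For example, CCCD contributes also to CCDC and
--     CDCC.
--     '''
--     if len(ints) <= 1:
--         return (ints,)
--     # Iterative left-to-right build: each state is (prefix, head at current slot).
--     states = [((), ints[0])]
--     for k in range(len(ints) - 1):
--         nxt = ints[k + 1]
--         states = [(prefix + (head - i,), nxt + i)
--                   for prefix, head in states
--                   for i in range(head + 1)]
--     return tuple(sorted(prefix + (head,) for prefix, head in states))
-- ===== Notes on version B (the rewrite author's own statement) =====
-- stated objective: alternative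
-- what changed: Replaced A's recursion, which sorts the candidate list at every recursion level, by an iterative left-to-right worklist of (prefix, head) states with a single sort applied once at the end.
import Mathlib
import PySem

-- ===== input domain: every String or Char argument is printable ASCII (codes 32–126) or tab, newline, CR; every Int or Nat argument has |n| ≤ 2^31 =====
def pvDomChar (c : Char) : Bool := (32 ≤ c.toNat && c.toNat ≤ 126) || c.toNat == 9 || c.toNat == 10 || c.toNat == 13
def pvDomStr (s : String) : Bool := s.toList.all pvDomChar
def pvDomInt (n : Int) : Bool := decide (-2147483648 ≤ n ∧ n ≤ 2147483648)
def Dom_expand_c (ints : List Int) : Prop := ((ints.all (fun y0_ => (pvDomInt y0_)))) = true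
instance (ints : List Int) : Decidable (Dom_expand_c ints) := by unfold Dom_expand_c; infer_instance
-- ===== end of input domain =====

-- B replaces A's recursion (which sorts at every recursion level) by an iterative
-- left-to-right worklist build with a single final sort (objective: alternative decomposition).

-- ===== PORT A =====
-- A: if len(ints) <= 1 return (ints,); else sorted tuples over i in range(head+1),
--    item in expand_c((body[0]+i,)+body[1:]).
def expand_c (ints : List Int) : List (List Int) :=
  match ints with
  | [] => [[]]
  | [x] => [[x]]
  | head :: b0 :: rest =>
    PySem.List.sorted
      ((PySem.List.pyRange 0 (head + 1) 1).flatMap (fun i =>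
        (expand_c ((b0 + i) :: rest)).map (fun item => (head - i) :: item)))
      (fun x => x) false
termination_by ints.length
decreasing_by simp

-- ===== PORT B =====
-- B: worklist of (prefix, head) states expanded left to right, sorted once at the end.
def expand_c_alt (ints : List Int) : List (List Int) :=
  if PySem.List.len ints ≤ 1 then [ints]
  else
    let states :=
      (PySem.List.pyRange 0 (PySem.List.len ints - 1) 1).foldl
        (fun states k =>
          let nxt := PySem.List.pyGetD ints (k + 1) 0
          states.flatMap (fun s =>
            (PySem.List.pyRange 0 (s.2 + 1) 1).map (fun i => (s.1 ++ [s.2 - i], nxt + i))))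
        [(([] : List Int), PySem.List.pyGetD ints 0 0)]
    PySem.List.sorted (states.map (fun s => s.1 ++ [s.2])) (fun x => x) false

-- ===== PRECONDITION & SPEC =====
def Spec_expand_c (ints : List Int) (out : List (List Int)) : Prop := out = expand_c_alt ints
instance (ints : List Int) (out : List (List Int)) : Decidable (Spec_expand_c ints out) := by unfold Spec_expand_c; infer_instance

-- ===== CLAIM (what is proved, stated in full; the proofs are below) =====
def Claim_equal_expand_c : Prop := ∀ (ints : List Int), Dom_expand_c ints → Spec_expand_c ints (expand_c ints)

-- ===== LEMMAS AND PROOFS =====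

-- the raw (unsorted) list of result tuples, generated in A's nesting order
def gen : List Int → List (List Int)
  | [] => [[]]
  | [x] => [[x]]
  | head :: b0 :: rest =>
    (PySem.List.pyRange 0 (head + 1) 1).flatMap (fun i =>
      (gen ((b0 + i) :: rest)).map (fun item => (head - i) :: item))
termination_by l => l.length
decreasing_by simp

-- pointwise-permutation congruence for flatMap
lemma flatMap_perm {α β : Type} (xs : List α) (f g : α → List β)
    (h : ∀ x ∈ xs, (f x).Perm (g x)) : (xs.flatMap f).Perm (xs.flatMap g) := by
  induction xs with
  | nil => simp
  | cons x xs ih =>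
    simp only [List.flatMap_cons]
    exact (h x (by simp)).append (ih (fun y hy => h y (by simp [hy])))

-- A's result is a permutation of gen
lemma expand_c_perm_gen : ∀ (l : List Int), (expand_c l).Perm (gen l) := by
  intro l
  induction hn : l.length using Nat.strong_induction_on generalizing l with
  | _ n ih =>
    match l with
    | [] => rw [expand_c, gen]
    | [x] => rw [expand_c, gen]
    | head :: b0 :: rest =>
      rw [expand_c, gen]
      refine (PySem.List.sorted_perm _ _ _).trans ?_
      refine flatMap_perm _ _ _ (fun i _ => ?_)
      exact (ih ((b0 + i) :: rest).length (by simp [← hn]) _ rfl).map _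

-- one worklist step of B
def step (nxt : Int) (states : List (List Int × Int)) : List (List Int × Int) :=
  states.flatMap (fun s =>
    (PySem.List.pyRange 0 (s.2 + 1) 1).map (fun i => (s.1 ++ [s.2 - i], nxt + i)))

-- invariant of B's worklist fold
lemma states_gen : ∀ (tail : List Int) (states : List (List Int × Int)),
    ((tail.foldl (fun st x => step x st) states).map (fun s => s.1 ++ [s.2]))
    = states.flatMap (fun s => (gen (s.2 :: tail)).map (fun t => s.1 ++ t)) := by
  intro tail
  induction tail with
  | nil =>
    intro states
    simp only [List.foldl_nil]
    induction states with
    | nil => simp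
    | cons s ss ihs => simp [gen, ihs]
  | cons x tail ih =>
    intro states
    rw [List.foldl_cons, ih (step x states)]
    simp only [step, List.flatMap_assoc, List.flatMap_map]
    congr 1
    funext s
    rw [gen]
    simp only [List.map_flatMap, List.map_map, Function.comp_def]
    congr 1
    funext i
    congr 1
    funext t
    simp

-- B's indexed fold is the structural fold over the tail
lemma alt_fold_eq (head : Int) (tail : List Int) (init : List (List Int × Int)) :
    (PySem.List.pyRange 0 (PySem.List.len (head :: tail) - 1) 1).foldl
      (fun st k => step (PySem.List.pyGetD (head :: tail) (k + 1) 0) st) init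
    = tail.foldl (fun st x => step x st) init := by
  have h1 : PySem.List.len (head :: tail) - 1 = PySem.List.len tail := by
    simp [PySem.List.len_eq]
  rw [h1]
  have h2 : (PySem.List.pyRange 0 (PySem.List.len tail) 1).foldl
      (fun st k => step (PySem.List.pyGetD (head :: tail) (k + 1) 0) st) init
      = (PySem.List.pyRange 0 (PySem.List.len tail) 1).foldl
      (fun st k => step (PySem.List.pyGetD tail k 0) st) init := by
    refine PySem.List.foldl_congr_mem _ _ _ _ (fun acc k hk => ?_)
    have hb := (PySem.List.mem_pyRange_one).1 hk
    obtain ⟨n, rfl⟩ : ∃ n : Nat, (n : Int) = k := ⟨k.toNat, by omega⟩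
    have : ((n : Int) + 1) = ((n + 1 : Nat) : Int) := by push_cast; ring
    rw [this, PySem.List.pyGetD_natCast, PySem.List.pyGetD_natCast, List.getD_cons_succ]
  rw [h2]
  exact PySem.List.foldl_pyRange_zero_pyGetD tail 0 (fun st x => step x st) init

-- B equals sorted gen on lists of length ≥ 2
lemma alt_eq_sorted_gen (head b0 : Int) (rest : List Int) :
    expand_c_alt (head :: b0 :: rest)
    = PySem.List.sorted (gen (head :: b0 :: rest)) (fun x => x) false := by
  unfold expand_c_alt
  rw [if_neg (by simp [PySem.List.len_eq])]
  show PySem.List.sorted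
      (((PySem.List.pyRange 0 (PySem.List.len (head :: b0 :: rest) - 1) 1).foldl
        (fun st k => step (PySem.List.pyGetD (head :: b0 :: rest) (k + 1) 0) st)
        [(([] : List Int), PySem.List.pyGetD (head :: b0 :: rest) 0 0)]).map
        (fun s => s.1 ++ [s.2]))
      (fun x => x) false = _
  rw [alt_fold_eq, PySem.List.pyGetD_zero_cons, states_gen]
  simp

-- bridge between the ports' default LT/DecidableLT instances on List Int and the
-- LinearOrder-derived ones that PySem's ORDER lemmas are stated with (they are defeq)
lemma sorted_inst (xs : List (List Int)) :
    PySem.List.sorted xs (fun x => x) false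
    = @PySem.List.sorted (List Int) (List Int) List.instLinearOrder.toLT LinearOrder.toDecidableLT xs (fun x => x) false := by
  congr 1

lemma sorted_perm_eq (xs ys : List (List Int)) (h : xs.Perm ys) :
    PySem.List.sorted xs (fun x => x) false = PySem.List.sorted ys (fun x => x) false := by
  rw [sorted_inst xs, sorted_inst ys]
  exact PySem.List.sorted_eq_sorted_of_perm _ _ _ (fun a b h => h) h

lemma sorted_idem (xs : List (List Int)) :
    PySem.List.sorted (PySem.List.sorted xs (fun x => x) false) (fun x => x) false
    = PySem.List.sorted xs (fun x => x) false := by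
  simp only [sorted_inst]
  exact PySem.List.sorted_sorted _ _

-- ===== VERDICT (by name: the statement is the Claim_ definition above) =====
theorem expand_c_spec : Claim_equal_expand_c := by
  intro ints _
  unfold Spec_expand_c
  match ints with
  | [] => simp [expand_c, expand_c_alt]
  | [x] => simp [expand_c, expand_c_alt, PySem.List.len_eq]
  | head :: b0 :: rest =>
    rw [alt_eq_sorted_gen, sorted_perm_eq _ _ (expand_c_perm_gen _).symm, expand_c]
    exact (sorted_idem _).symm
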